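-- pv_equiv track=rewrite | github.com/MikeFE/aoc2022 | 08/day8.py | get_trees_in_direction
-- ===== SOURCE A (Python) =====
-- def get_trees_in_direction(m, row, col, direction):
--     if direction == 'left':
--         vals = m[row][:col]
--         vals.reverse()
--     elif direction == 'right':
--         vals = m[row][col + 1:]
--     elif direction == 'top':
--         vals = [v[col] for v in m[:row]]
--         vals.reverse()
--     elif direction == 'bottom':
--         vals = [v[col] for v in m[row + 1:]]
--     return vals
-- ===== SOURCE B (Python) =====
-- def get_trees_in_direction(m, row, col, direction):
--     # one unified mechanism: pick the line (row or column) and a pivot index,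
--     # normalize the pivot the way Python does, then walk outward with an index loop
--     if direction == 'left' or direction == 'right':
--         line = m[row]
--         n = len(line)
--         fetch = lambda i: line[i]
--         pivot = col
--     elif direction == 'top' or direction == 'bottom':
--         n = len(m)
--         fetch = lambda i: m[i][col]
--         pivot = row
--     if pivot < 0:
--         pivot += n
--     vals = []
--     if direction == 'left' or direction == 'top':
--         i = min(pivot, n) - 1
--         while i >= 0:
--             vals.append(fetch(i))
--             i -= 1
--     else:
--         i = max(pivot + 1, 0)
--         while i < n:
--             vals.append(fetch(i))
--             i += 1
--     return vals
-- ===== Notes on version B (the rewrite author's own statement) =====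
-- stated objective: alternative
-- what changed: Replaces A's four slice-and-reverse branches (row slices and column comprehensions) by one unified mechanism: pick the line (row or column) and the pivot cell's index on it, normalize the pivot the way Python does, then walk outward with an index loop.
-- intended difference: On 'right' with col=-1 (resp. 'bottom' with row=-1) on a nonempty row/grid, Python's col+1 (row+1) wraps from the last cell back to index 0 so A returns the entire row/column; B returns [], the intended value, since no cell lies beyond the last one in that direction. — e.g. on get_trees_in_direction([[1, 2]], 0, -1, "right"): A returns [1, 2], B returns []
import Mathlib
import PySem

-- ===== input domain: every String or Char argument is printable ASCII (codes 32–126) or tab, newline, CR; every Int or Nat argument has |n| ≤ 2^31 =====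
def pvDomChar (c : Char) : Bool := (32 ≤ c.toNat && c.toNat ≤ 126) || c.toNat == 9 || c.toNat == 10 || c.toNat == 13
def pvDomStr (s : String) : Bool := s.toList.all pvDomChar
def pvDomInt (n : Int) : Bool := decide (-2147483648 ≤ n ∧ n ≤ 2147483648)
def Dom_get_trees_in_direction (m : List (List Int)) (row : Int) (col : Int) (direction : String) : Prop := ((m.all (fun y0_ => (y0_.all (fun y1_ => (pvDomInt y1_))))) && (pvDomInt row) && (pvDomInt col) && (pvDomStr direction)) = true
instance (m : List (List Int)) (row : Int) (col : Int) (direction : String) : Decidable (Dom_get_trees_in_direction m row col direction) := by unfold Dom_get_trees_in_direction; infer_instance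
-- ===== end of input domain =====

-- B replaces A's four slice-and-reverse branches by one unified mechanism (pick a line and a pivot,
-- normalize the pivot as Python does, walk outward with an index loop); objective: alternative (same cost).

-- ===== PORT A =====
-- A: per-direction slice of the row / column comprehension; out-of-range m[row] or v[col] = Python raise,
-- excluded by Pre_, defaults [] / 0 used there.
def get_trees_in_direction (m : List (List Int)) (row : Int) (col : Int) (direction : String) : List Int :=
  if direction = "left" then
    (PySem.List.slice (PySem.List.pyGetD m row []) none (some col)).reverse
  else if direction = "right" then
    PySem.List.slice (PySem.List.pyGetD m row []) (some (col + 1)) none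
  else if direction = "top" then
    ((PySem.List.slice m none (some row)).map (fun v => PySem.List.pyGetD v col 0)).reverse
  else if direction = "bottom" then
    (PySem.List.slice m (some (row + 1)) none).map (fun v => PySem.List.pyGetD v col 0)
  else []  -- Python: UnboundLocalError; excluded by Pre_

-- ===== PORT B =====
-- the two while loops of Source B (walk toward index 0 / walk toward the end); fuel only totalizes them
def pvCollectDown (fetch : Int → Int) : Nat → Int → List Int
  | 0, _ => []
  | fuel + 1, i => if 0 ≤ i then fetch i :: pvCollectDown fetch fuel (i - 1) else []

def pvCollectUp (fetch : Int → Int) (n : Int) : Nat → Int → List Int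
  | 0, _ => []
  | fuel + 1, i => if i < n then fetch i :: pvCollectUp fetch n fuel (i + 1) else []

def get_trees_in_direction_alt (m : List (List Int)) (row : Int) (col : Int) (direction : String) : List Int :=
  -- (n, fetch, pivot): the line scanned (the row or the column) and the pivot cell's index on it
  let p : Nat × (Int → Int) × Int :=
    if direction = "left" ∨ direction = "right" then
      ((PySem.List.pyGetD m row ([] : List Int)).length,
       fun i => PySem.List.pyGetD (PySem.List.pyGetD m row ([] : List Int)) i 0, col)
    else  -- Python: unknown direction raises UnboundLocalError; excluded by Pre_
      (m.length, fun i => PySem.List.pyGetD (PySem.List.pyGetD m i ([] : List Int)) col 0, row)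
  let n : Int := p.1
  let pivot : Int := if p.2.2 < 0 then p.2.2 + n else p.2.2
  if direction = "left" ∨ direction = "top" then
    pvCollectDown p.2.1 p.1 (min pivot n - 1)
  else
    pvCollectUp p.2.1 n p.1 (max (pivot + 1) 0)

-- ===== PRECONDITION & SPEC =====
-- Pre_ = exactly the inputs on which the Python A returns: a known direction, m[row] in range for left/right,
-- and v[col] in range for every row v that the top/bottom comprehension actually indexes.
def Pre_get_trees_in_direction (m : List (List Int)) (row : Int) (col : Int) (direction : String) : Prop :=
  (direction = "left" ∨ direction = "right" ∨ direction = "top" ∨ direction = "bottom") ∧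
  ((direction = "left" ∨ direction = "right") → PySem.Raise.InRange m.length row) ∧
  (direction = "top" → ∀ v ∈ PySem.List.slice m none (some row), PySem.Raise.InRange v.length col) ∧
  (direction = "bottom" → ∀ v ∈ PySem.List.slice m (some (row + 1)) none, PySem.Raise.InRange v.length col)
instance (m : List (List Int)) (row : Int) (col : Int) (direction : String) : Decidable (Pre_get_trees_in_direction m row col direction) := by unfold Pre_get_trees_in_direction; infer_instance

def pvWitness_get_trees_in_direction : List (List Int) × Int × Int × String := ([[1, 2], [3, 4]], 0, 1, "right")

-- On 'right' with col = -1 (resp. 'bottom' with row = -1) on a nonempty row/grid, Python's col+1 (row+1) wraps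
-- from the last cell back to index 0, so A returns the ENTIRE row/column; B returns [], the intended value,
-- since no cell lies beyond the last one in that direction.
def D_get_trees_in_direction (m : List (List Int)) (row : Int) (col : Int) (direction : String) : Prop :=
  (direction = "right" ∧ col = -1 ∧ PySem.List.pyGetD m row ([] : List Int) ≠ []) ∨
  (direction = "bottom" ∧ row = -1 ∧ m ≠ [])
instance (m : List (List Int)) (row : Int) (col : Int) (direction : String) : Decidable (D_get_trees_in_direction m row col direction) := by unfold D_get_trees_in_direction; infer_instance

def Spec_get_trees_in_direction (m : List (List Int)) (row : Int) (col : Int) (direction : String) (out : List Int) : Prop := ¬ D_get_trees_in_direction m row col direction → out = get_trees_in_direction_alt m row col direction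
instance (m : List (List Int)) (row : Int) (col : Int) (direction : String) (out : List Int) : Decidable (Spec_get_trees_in_direction m row col direction out) := by unfold Spec_get_trees_in_direction; infer_instance

def pvDiffWitness_get_trees_in_direction : List (List Int) × Int × Int × String := ([[1, 2]], 0, -1, "right")
def pvDiffWitnessOut_get_trees_in_direction : (List Int) × (List Int) := ([1, 2], [])

-- ===== CLAIM (what is proved, stated in full; the proofs are below) =====
def Claim_unchanged_get_trees_in_direction : Prop := ∀ (m : List (List Int)) (row : Int) (col : Int) (direction : String), Dom_get_trees_in_direction m row col direction → Pre_get_trees_in_direction m row col direction → Spec_get_trees_in_direction m row col direction (get_trees_in_direction m row col direction)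
def Claim_changed_get_trees_in_direction : Prop := Dom_get_trees_in_direction (pvDiffWitness_get_trees_in_direction.1) (pvDiffWitness_get_trees_in_direction.2.1) (pvDiffWitness_get_trees_in_direction.2.2.1) (pvDiffWitness_get_trees_in_direction.2.2.2) ∧ Pre_get_trees_in_direction (pvDiffWitness_get_trees_in_direction.1) (pvDiffWitness_get_trees_in_direction.2.1) (pvDiffWitness_get_trees_in_direction.2.2.1) (pvDiffWitness_get_trees_in_direction.2.2.2) ∧ D_get_trees_in_direction (pvDiffWitness_get_trees_in_direction.1) (pvDiffWitness_get_trees_in_direction.2.1) (pvDiffWitness_get_trees_in_direction.2.2.1) (pvDiffWitness_get_trees_in_direction.2.2.2) ∧ get_trees_in_direction (pvDiffWitness_get_trees_in_direction.1) (pvDiffWitness_get_trees_in_direction.2.1) (pvDiffWitness_get_trees_in_direction.2.2.1) (pvDiffWitness_get_trees_in_direction.2.2.2) = pvDiffWitnessOut_get_trees_in_direction.1 ∧ get_trees_in_direction_alt (pvDiffWitness_get_trees_in_direction.1) (pvDiffWitness_get_trees_in_direction.2.1) (pvDiffWitness_get_trees_in_direction.2.2.1) (pvDiffWitness_get_trees_in_direction.2.2.2)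 = pvDiffWitnessOut_get_trees_in_direction.2 ∧ pvDiffWitnessOut_get_trees_in_direction.1 ≠ pvDiffWitnessOut_get_trees_in_direction.2
def Claim_exact_get_trees_in_direction : Prop := ∀ (m : List (List Int)) (row : Int) (col : Int) (direction : String), Dom_get_trees_in_direction m row col direction → Pre_get_trees_in_direction m row col direction → D_get_trees_in_direction m row col direction → get_trees_in_direction m row col direction ≠ get_trees_in_direction_alt m row col direction

-- ===== LEMMAS AND PROOFS =====

theorem pv_reverse_take_succ {α : Type} (l : List α) (n : Nat) (h : n < l.length) :
    (List.take (n + 1) l).reverse = l[n] :: (List.take n l).reverse := by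
  rw [List.take_add_one, List.getElem?_eq_getElem h]
  simp

theorem pv_clampIdx (n : Nat) (k : Int) :
    PySem.List.clampIdx n k = (min (max (if k < 0 then k + n else k) 0) n).toNat := by
  unfold PySem.List.clampIdx
  split
  · split <;> omega
  · omega

theorem pv_slice_to_clamp {α : Type} (l : List α) (b : Int) :
    PySem.List.slice l none (some b) = l.take (PySem.List.clampIdx l.length b) := by
  simp [PySem.List.slice]

theorem pvDown_list (l : List Int) :
    ∀ (fuel : Nat) (i : Int), i < l.length → (i + 1).toNat ≤ fuel →
      pvCollectDown (fun j => PySem.List.pyGetD l j 0) fuel i = (l.take (i + 1).toNat).reverse := by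
  intro fuel
  induction fuel with
  | zero =>
    intro i _ hf
    have h : (i + 1).toNat = 0 := by omega
    simp [pvCollectDown, h]
  | succ fuel ih =>
    intro i hi hf
    by_cases h0 : 0 ≤ i
    · have hlt : i.toNat < l.length := by omega
      have hget : PySem.List.pyGetD l i 0 = l[i.toNat] := PySem.List.pyGetD_eq_getElem _ _ h0 hi
      have hrec := ih (i - 1) (by omega) (by omega)
      have htn : (i + 1).toNat = i.toNat + 1 := by omega
      have htn' : (i - 1 + 1).toNat = i.toNat := by omega
      simp only [pvCollectDown, if_pos h0]
      rw [hget, hrec, htn', htn, pv_reverse_take_succ _ _ hlt]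
    · have h : (i + 1).toNat = 0 := by omega
      simp [pvCollectDown, if_neg h0, h]

theorem pvUp_list (l : List Int) :
    ∀ (fuel : Nat) (i : Int), 0 ≤ i → l.length ≤ fuel + i.toNat →
      pvCollectUp (fun j => PySem.List.pyGetD l j 0) l.length fuel i = l.drop i.toNat := by
  intro fuel
  induction fuel with
  | zero =>
    intro i _ hf
    rw [List.drop_of_length_le (by omega)]
    simp [pvCollectUp]
  | succ fuel ih =>
    intro i h0 hf
    by_cases hlt : i < (l.length : Int)
    · have hgt : i.toNat < l.length := by omega
      have hget : PySem.List.pyGetD l i 0 = l[i.toNat] := PySem.List.pyGetD_eq_getElem _ _ h0 hlt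
      have hrec := ih (i + 1) (by omega) (by omega)
      have htn : (i + 1).toNat = i.toNat + 1 := by omega
      rw [List.drop_eq_getElem_cons hgt]
      simp only [pvCollectUp, if_pos hlt]
      rw [hget, hrec, htn]
    · have hcond : ¬ (i < (l.length : Int)) := hlt
      rw [List.drop_of_length_le (by omega)]
      simp [pvCollectUp, if_neg hcond]

theorem pvDown_col (m : List (List Int)) (col : Int) :
    ∀ (fuel : Nat) (i : Int), i < m.length → (i + 1).toNat ≤ fuel →
      pvCollectDown (fun j => PySem.List.pyGetD (PySem.List.pyGetD m j ([] : List Int)) col 0) fuel i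
        = ((m.take (i + 1).toNat).map (fun v => PySem.List.pyGetD v col 0)).reverse := by
  intro fuel
  induction fuel with
  | zero =>
    intro i _ hf
    have h : (i + 1).toNat = 0 := by omega
    simp [pvCollectDown, h]
  | succ fuel ih =>
    intro i hi hf
    by_cases h0 : 0 ≤ i
    · have hlt : i.toNat < m.length := by omega
      have hget : PySem.List.pyGetD m i ([] : List Int) = m[i.toNat] := PySem.List.pyGetD_eq_getElem _ _ h0 hi
      have hrec := ih (i - 1) (by omega) (by omega)
      have htn : (i + 1).toNat = i.toNat + 1 := by omega
      have htn' : (i - 1 + 1).toNat = i.toNat := by omega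
      simp only [pvCollectDown, if_pos h0]
      rw [hget, hrec, htn', htn, List.map_take, List.map_take,
        pv_reverse_take_succ _ _ (by simpa using hlt), List.getElem_map]
    · have h : (i + 1).toNat = 0 := by omega
      simp [pvCollectDown, if_neg h0, h]

theorem pvUp_col (m : List (List Int)) (col : Int) :
    ∀ (fuel : Nat) (i : Int), 0 ≤ i → m.length ≤ fuel + i.toNat →
      pvCollectUp (fun j => PySem.List.pyGetD (PySem.List.pyGetD m j ([] : List Int)) col 0) m.length fuel i
        = (m.drop i.toNat).map (fun v => PySem.List.pyGetD v col 0) := by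
  intro fuel
  induction fuel with
  | zero =>
    intro i _ hf
    rw [List.drop_of_length_le (by omega)]
    simp [pvCollectUp]
  | succ fuel ih =>
    intro i h0 hf
    by_cases hlt : i < (m.length : Int)
    · have hgt : i.toNat < m.length := by omega
      have hget : PySem.List.pyGetD m i ([] : List Int) = m[i.toNat] := PySem.List.pyGetD_eq_getElem _ _ h0 hlt
      have hrec := ih (i + 1) (by omega) (by omega)
      have htn : (i + 1).toNat = i.toNat + 1 := by omega
      rw [List.drop_eq_getElem_cons hgt, List.map_cons]
      simp only [pvCollectUp, if_pos hlt]
      rw [hget, hrec, htn]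
    · have hcond : ¬ (i < (m.length : Int)) := hlt
      rw [List.drop_of_length_le (by omega)]
      simp [pvCollectUp, if_neg hcond]

-- ===== VERDICT (by name: the statement is the Claim_ definition above) =====
theorem get_trees_in_direction_spec : Claim_unchanged_get_trees_in_direction := by
  intro m row col direction _ hpre
  unfold Spec_get_trees_in_direction
  intro hD
  obtain ⟨hdir, hlr, htop, hbot⟩ := hpre
  unfold get_trees_in_direction get_trees_in_direction_alt
  rcases hdir with h | h | h | h <;> subst h <;>
    simp only [String.reduceEq, or_true, or_false, or_self, if_true, if_false]
  · -- left
    set l := PySem.List.pyGetD m row ([] : List Int) with hl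
    set pivot := (if col < 0 then col + (l.length : Int) else col) with hp
    have hmin : min pivot (l.length : Int) ≤ (l.length : Int) := min_le_right _ _
    rw [pvDown_list l l.length (min pivot ↑l.length - 1) (by omega) (by omega),
      pv_slice_to_clamp, pv_clampIdx, ← hp]
    congr 2
    omega
  · -- right
    set l := PySem.List.pyGetD m row ([] : List Int) with hl
    have hDl : col = -1 → l = [] := by
      intro hc
      by_contra hne
      exact hD (Or.inl ⟨rfl, hc, hne⟩)
    rw [pvUp_list l l.length (max ((if col < 0 then col + (l.length : Int) else col) + 1) 0)
        (le_max_right _ _) (by split <;> omega),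
      PySem.List.slice_some_none, pv_clampIdx,
      List.drop_eq_drop_min, List.drop_eq_drop_min
        (i := (max ((if col < 0 then col + (l.length : Int) else col) + 1) 0).toNat)]
    congr 1
    rcases eq_or_ne col (-1) with hc | hc
    · have h0 : l.length = 0 := by simp [hDl hc]
      subst hc
      split <;> split <;> omega
    · split <;> split <;> omega
  · -- top
    set pivot := (if row < 0 then row + (m.length : Int) else row) with hp
    have hmin : min pivot (m.length : Int) ≤ (m.length : Int) := min_le_right _ _
    rw [pvDown_col m col m.length (min pivot ↑m.length - 1) (by omega) (by omega),
      pv_slice_to_clamp, pv_clampIdx, ← hp]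
    congr 3
    omega
  · -- bottom
    have hDm : row = -1 → m = [] := by
      intro hc
      by_contra hne
      exact hD (Or.inr ⟨rfl, hc, hne⟩)
    rw [pvUp_col m col m.length (max ((if row < 0 then row + (m.length : Int) else row) + 1) 0)
        (le_max_right _ _) (by split <;> omega),
      PySem.List.slice_some_none, pv_clampIdx,
      List.drop_eq_drop_min, List.drop_eq_drop_min
        (i := (max ((if row < 0 then row + (m.length : Int) else row) + 1) 0).toNat)]
    congr 2
    rcases eq_or_ne row (-1) with hc | hc
    · have h0 : m.length = 0 := by simp [hDm hc]
      subst hc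
      split <;> split <;> omega
    · split <;> split <;> omega

theorem get_trees_in_direction_changed : Claim_changed_get_trees_in_direction := by
  unfold Claim_changed_get_trees_in_direction; decide

theorem get_trees_in_direction_tight : Claim_exact_get_trees_in_direction := by
  intro m row col direction _ hpre hD
  obtain ⟨_, hlr, _, _⟩ := hpre
  unfold get_trees_in_direction get_trees_in_direction_alt
  rcases hD with ⟨hd, hc, hne⟩ | ⟨hd, hr, hne⟩ <;> subst hd <;>
    simp only [String.reduceEq, or_true, or_self, if_true, if_false]
  · -- right, col = -1: A = whole row, B = []
    subst hc
    set l := PySem.List.pyGetD m row ([] : List Int) with hl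
    have hne' : l.length ≠ 0 := by
      intro h0
      exact hne (List.length_eq_zero_iff.mp h0)
    rw [pvUp_list l l.length (max ((if (-1 : Int) < 0 then (-1 : Int) + (l.length : Int) else -1) + 1) 0)
        (le_max_right _ _) (by split <;> omega),
      show (max ((if (-1 : Int) < 0 then (-1 : Int) + (l.length : Int) else -1) + 1) 0).toNat = l.length
        by split <;> omega,
      List.drop_length,
      show ((-1 : Int) + 1) = 0 from by norm_num,
      PySem.List.slice_some_none, pv_clampIdx]
    simpa using hne
  · -- bottom, row = -1: A = whole column, B = []
    subst hr
    have hne' : m.length ≠ 0 := by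
      intro h0
      exact hne (List.length_eq_zero_iff.mp h0)
    rw [pvUp_col m col m.length (max ((if (-1 : Int) < 0 then (-1 : Int) + (m.length : Int) else -1) + 1) 0)
        (le_max_right _ _) (by split <;> omega),
      show (max ((if (-1 : Int) < 0 then (-1 : Int) + (m.length : Int) else -1) + 1) 0).toNat = m.length
        by split <;> omega,
      List.drop_length,
      show ((-1 : Int) + 1) = 0 from by norm_num,
      PySem.List.slice_some_none, pv_clampIdx]
    simpa using hne
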